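-- pv_equiv track=rewrite | github.com/jd7jez/ProjectSudoku | SudokuBoard.py | get_actual_rewards_mask
-- ===== SOURCE A (Python) =====
-- def get_actual_rewards_mask(board, solved):
--     reward_mask = [0 for _ in range(81 * 9)]
--     for y, row in enumerate(board):
--         for x, val in enumerate(row):
--             if val == 0:
--                 first_action = (y * 81) + (x * 9)
--                 correct_action = first_action + (solved[y][x] - 1)
--                 for i in range(first_action, first_action+9):
--                     reward_mask[i] = 2 if i != correct_action else 1
--     return reward_mask
-- ===== SOURCE B (Python) =====
-- def get_actual_rewards_mask(board, solved):
--     def cell(y, x, k):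
--         if y < len(board) and x < len(board[y]) and board[y][x] == 0:
--             return 1 if k == solved[y][x] - 1 else 2
--         return 0
--     return [cell(i // 81, i % 81 // 9, i % 9) for i in range(729)]
-- ===== Notes on version B (the rewrite author's own statement) =====
-- stated objective: alternative
-- what changed: B builds the 729-length mask in a single output-driven pass, decoding each flat index i into (y, x, k) by index arithmetic and computing its value directly, instead of A's preallocate-then-mutate nested loops over cells that write 9-slot blocks in place.
-- outside the precondition, e.g. on get_actual_rewards_mask([[0]], []): A raises IndexError
import Mathlib
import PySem

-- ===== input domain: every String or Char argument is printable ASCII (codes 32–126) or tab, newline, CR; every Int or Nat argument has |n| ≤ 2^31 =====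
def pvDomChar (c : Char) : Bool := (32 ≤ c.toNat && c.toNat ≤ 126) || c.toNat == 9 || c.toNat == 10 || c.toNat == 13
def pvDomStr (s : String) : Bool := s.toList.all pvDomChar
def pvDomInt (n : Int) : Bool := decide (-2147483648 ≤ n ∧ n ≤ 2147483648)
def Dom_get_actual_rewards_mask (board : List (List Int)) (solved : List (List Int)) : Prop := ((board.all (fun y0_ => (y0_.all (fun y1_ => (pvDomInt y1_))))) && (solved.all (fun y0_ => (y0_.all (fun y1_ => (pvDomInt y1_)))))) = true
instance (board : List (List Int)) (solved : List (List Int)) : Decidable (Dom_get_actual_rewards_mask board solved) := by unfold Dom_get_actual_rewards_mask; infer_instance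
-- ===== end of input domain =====

-- B fills the 729-mask in one output-driven pass (decoding each flat index into y, x, k)
-- instead of A's preallocate-then-write nested cell loops; objective: alternative (no speed claim).

-- ===== PORT A =====
-- Literal port of A: 729-zero buffer, nested enumerate loops, in-place block writes.
-- solved[y][x] is ported with pyGetD and reward_mask[i] = … with pySetD; both are exact under
-- Pre_ (all touched indices are then in range); outside Pre_ the Python raises IndexError there.
def get_actual_rewards_mask (board : List (List Int)) (solved : List (List Int)) : List Int :=
  let reward_mask : List Int := List.replicate (81 * 9) 0
  (PySem.List.enumerate board 0).foldl (fun mask yrow =>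
    (PySem.List.enumerate yrow.2 0).foldl (fun mask xval =>
      if xval.2 = 0 then
        let first_action : Int := yrow.1 * 81 + xval.1 * 9
        let correct_action : Int :=
          first_action + (PySem.List.pyGetD (PySem.List.pyGetD solved yrow.1 []) xval.1 0 - 1)
        (PySem.List.pyRange first_action (first_action + 9) 1).foldl
          (fun m i => PySem.List.pySetD m i (if i ≠ correct_action then 2 else 1)) mask
      else mask) mask) reward_mask

-- ===== PORT B =====
-- Port of Source B's helper 'cell': the bounds tests guard every board lookup (the indices are
-- nonnegative, so pyGetD is exact there); the solved lookup is in range under Pre_ and raises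
-- IndexError in Python outside it.
def pvCellAlt (board : List (List Int)) (solved : List (List Int)) (y x k : Int) : Int :=
  if y < (board.length : Int) then
    if x < ((PySem.List.pyGetD board y []).length : Int) then
      if PySem.List.pyGetD (PySem.List.pyGetD board y []) x 0 = 0 then
        if k = PySem.List.pyGetD (PySem.List.pyGetD solved y []) x 0 - 1 then 1 else 2
      else 0
    else 0
  else 0

def get_actual_rewards_mask_alt (board : List (List Int)) (solved : List (List Int)) : List Int :=
  (PySem.List.pyRange 0 729 1).map (fun i =>
    pvCellAlt board solved (PySem.Int.floordiv i 81)
      (PySem.Int.floordiv (PySem.Int.mod i 81) 9) (PySem.Int.mod i 9))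

-- ===== PRECONDITION & SPEC =====
-- Pre_ excludes exactly the inputs with a blank (0) cell outside the 9×9 grid or not covered by
-- solved: there A either raises IndexError (block write or solved lookup out of range) or, when
-- the blank's flat slot still fits the 729 buffer, writes its block at a position that belongs
-- to a different cell of a genuine 9×9 grid — an artefact of flat 81/9 indexing on malformed
-- boards that a shape-driven reading cannot share.
def Pre_get_actual_rewards_mask (board : List (List Int)) (solved : List (List Int)) : Prop :=
  ∀ y < board.length, ∀ x < (board.getD y []).length,
    (board.getD y []).getD x 0 = 0 →
      y < 9 ∧ x < 9 ∧ y < solved.length ∧ x < (solved.getD y []).length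
instance (board : List (List Int)) (solved : List (List Int)) : Decidable (Pre_get_actual_rewards_mask board solved) := by unfold Pre_get_actual_rewards_mask; infer_instance

def pvWitness_get_actual_rewards_mask : List (List Int) × List (List Int) :=
  ([[0, 2, 3, 4, 5, 6, 7, 8, 9], [4, 5, 6, 7, 8, 9, 1, 2, 0]],
   [[1, 2, 3, 4, 5, 6, 7, 8, 9], [4, 5, 6, 7, 8, 9, 1, 2, 3]])

def Spec_get_actual_rewards_mask (board : List (List Int)) (solved : List (List Int)) (out : List Int) : Prop := out = get_actual_rewards_mask_alt board solved
instance (board : List (List Int)) (solved : List (List Int)) (out : List Int) : Decidable (Spec_get_actual_rewards_mask board solved out) := by unfold Spec_get_actual_rewards_mask; infer_instance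

-- ===== CLAIM (what is proved, stated in full; the proofs are below) =====
def Claim_equal_get_actual_rewards_mask : Prop := ∀ (board : List (List Int)) (solved : List (List Int)), Dom_get_actual_rewards_mask board solved → Pre_get_actual_rewards_mask board solved → Spec_get_actual_rewards_mask board solved (get_actual_rewards_mask board solved)

-- ===== LEMMAS AND PROOFS =====

-- the value both programs hold at flat index j
def pvSv (board : List (List Int)) (solved : List (List Int)) (j : Nat) : Int :=
  if j / 81 < board.length ∧ j % 81 / 9 < (board.getD (j / 81) []).length ∧
     (board.getD (j / 81) []).getD (j % 81 / 9) 0 = 0 then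
    (if ((j % 9 : Nat) : Int) = (solved.getD (j / 81) []).getD (j % 81 / 9) 0 - 1 then 1 else 2)
  else 0

theorem pv_blk_len (n : Nat) (first c : Int) (m : List Int) :
    ((PySem.List.pyRange first (first + n) 1).foldl
      (fun m i => PySem.List.pySetD m i (if i ≠ c then 2 else 1)) m).length = m.length := by
  induction n generalizing first m with
  | zero => rw [PySem.List.pyRange_one_eq_nil (by omega)]; rfl
  | succ n ih =>
    rw [PySem.List.pyRange_one_cons (by omega)]
    simp only [List.foldl_cons]
    have : first + (n + 1 : Nat) = (first + 1) + n := by push_cast; ring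
    rw [this, ih]
    exact PySem.List.length_pySetD ..

theorem pv_blk9_len (first c : Int) (m : List Int) :
    ((PySem.List.pyRange first (first + 9) 1).foldl
      (fun m i => PySem.List.pySetD m i (if i ≠ c then 2 else 1)) m).length = m.length := by
  simpa using pv_blk_len 9 first c m

theorem pv_blk_get (n : Nat) (first : Int) (c : Int) (m : List Int) (j : Nat) (hf : 0 ≤ first) :
    ((PySem.List.pyRange first (first + n) 1).foldl
      (fun m i => PySem.List.pySetD m i (if i ≠ c then 2 else 1)) m)[j]? =
    if first ≤ (j : Int) ∧ (j : Int) < first + n ∧ j < m.length then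
      some (if (j : Int) ≠ c then 2 else 1)
    else m[j]? := by
  induction n generalizing first m with
  | zero =>
    rw [PySem.List.pyRange_one_eq_nil (by omega)]
    simp only [List.foldl_nil]
    rw [if_neg (by omega)]
  | succ n ih =>
    rw [PySem.List.pyRange_one_cons (by omega)]
    simp only [List.foldl_cons]
    have h1 : first + (n + 1 : Nat) = (first + 1) + n := by push_cast; ring
    rw [h1, ih _ _ (by omega)]
    rw [PySem.List.pySetD_of_nonneg m _ hf]
    rw [List.length_set]
    by_cases hji : (j : Int) = first
    · rw [← hji]
      simp only [Int.toNat_natCast]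
      by_cases hlen : j < m.length
      · have hB : ¬((↑j:ℤ) + 1 ≤ ↑j ∧ (↑j:ℤ) < ↑j + 1 + ↑n ∧ j < m.length) := by omega
        have hA : ((↑j:ℤ) ≤ ↑j ∧ (↑j:ℤ) < ↑j + 1 + ↑n ∧ j < m.length) := ⟨le_rfl, by omega, hlen⟩
        rw [if_neg hB, List.getElem?_set_self hlen, if_pos hA]
      · have hB : ¬((↑j:ℤ) + 1 ≤ ↑j ∧ (↑j:ℤ) < ↑j + 1 + ↑n ∧ j < m.length) := by omega
        have hA : ¬((↑j:ℤ) ≤ ↑j ∧ (↑j:ℤ) < ↑j + 1 + ↑n ∧ j < m.length) := by omega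
        rw [if_neg hB, if_neg hA, List.getElem?_set, if_pos rfl, if_neg hlen,
            List.getElem?_eq_none (by omega)]
    · rw [List.getElem?_set_ne (by omega)]
      by_cases hc : first + 1 ≤ (j:Int) ∧ (j:Int) < first + 1 + n ∧ j < m.length
      · rw [if_pos hc, if_pos (show first ≤ (j:ℤ) ∧ (j:ℤ) < first + 1 + ↑n ∧ j < m.length from by omega)]
      · rw [if_neg hc, if_neg (show ¬(first ≤ (j:ℤ) ∧ (j:ℤ) < first + 1 + ↑n ∧ j < m.length) from by omega)]

theorem pv_blk9_get (first : Int) (c : Int) (m : List Int) (j : Nat) (hf : 0 ≤ first) :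
    ((PySem.List.pyRange first (first + 9) 1).foldl
      (fun m i => PySem.List.pySetD m i (if i ≠ c then 2 else 1)) m)[j]? =
    if first ≤ (j : Int) ∧ (j : Int) < first + 9 ∧ j < m.length then
      some (if (j : Int) ≠ c then 2 else 1)
    else m[j]? := by
  simpa using pv_blk_get 9 first c m j hf

theorem pv_inner_char (solved : List (List Int)) (Y : Nat) (row : List Int) (x0 : Nat)
    (m : List Int) (hm : m.length = 729) (j : Nat) (hj : j < 729)
    (hb : ∀ x' < row.length, row.getD x' 0 = 0 → Y < 9 ∧ x0 + x' < 9) :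
    ((PySem.List.enumerate row (x0 : Int)).foldl (fun mask xval =>
      if xval.2 = 0 then
        (PySem.List.pyRange ((Y : Int) * 81 + xval.1 * 9) ((Y : Int) * 81 + xval.1 * 9 + 9) 1).foldl
          (fun m i => PySem.List.pySetD m i
            (if i ≠ (Y : Int) * 81 + xval.1 * 9 + (PySem.List.pyGetD (PySem.List.pyGetD solved (Y : Int) []) xval.1 0 - 1) then 2 else 1)) mask
      else mask) m)[j]? =
    if j / 81 = Y ∧ x0 ≤ j % 81 / 9 ∧ j % 81 / 9 - x0 < row.length ∧
        row.getD (j % 81 / 9 - x0) 0 = 0 then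
      some (if ((j % 9 : Nat) : Int) = (solved.getD Y []).getD (j % 81 / 9) 0 - 1 then 1 else 2)
    else m[j]? := by
  induction row generalizing x0 m with
  | nil =>
    rw [PySem.List.enumerate_nil, List.foldl_nil,
      if_neg (by rintro ⟨_, _, h3, _⟩; simp at h3)]
  | cons v rest ih =>
    rw [PySem.List.enumerate_cons, List.foldl_cons]
    have hcast : (x0 : Int) + 1 = ((x0 + 1 : Nat) : Int) := by push_cast; ring
    rw [hcast]
    set q := j % 81 / 9 with hq
    set m' := (if v = 0 then
        (PySem.List.pyRange ((Y : Int) * 81 + (x0:Int) * 9) ((Y : Int) * 81 + (x0:Int) * 9 + 9) 1).foldl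
          (fun m i => PySem.List.pySetD m i
            (if i ≠ (Y : Int) * 81 + (x0:Int) * 9 + (PySem.List.pyGetD (PySem.List.pyGetD solved (Y : Int) []) (x0:Int) 0 - 1) then 2 else 1)) m
      else m) with hm'
    have hlen' : m'.length = 729 := by
      rw [hm']; split
      · rw [pv_blk9_len, hm]
      · exact hm
    have hb' : ∀ x' < rest.length, rest.getD x' 0 = 0 → Y < 9 ∧ (x0 + 1) + x' < 9 := by
      intro x' hx' h0
      have := hb (x' + 1) (by simpa using hx') (by simpa using h0)
      omega
    rw [ih (x0 + 1) m' hlen' hb']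
    by_cases hcond' : j / 81 = Y ∧ x0 + 1 ≤ q ∧ q - (x0 + 1) < rest.length ∧
        rest.getD (q - (x0 + 1)) 0 = 0
    · rw [if_pos hcond']
      have hC : j / 81 = Y ∧ x0 ≤ q ∧ q - x0 < (v :: rest).length ∧
          (v :: rest).getD (q - x0) 0 = 0 :=
        ⟨hcond'.1, by omega, by rw [List.length_cons]; omega,
          by rw [show q - x0 = (q - (x0 + 1)) + 1 from by omega, List.getD_cons_succ]
             exact hcond'.2.2.2⟩
      rw [if_pos hC]
    · rw [if_neg hcond']
      by_cases hc0 : j / 81 = Y ∧ q = x0 ∧ v = 0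
      · -- j lies in the block this cell writes
        obtain ⟨hY9, hx9⟩ := hb 0 (by simp) (by simpa using hc0.2.2)
        have hC : j / 81 = Y ∧ x0 ≤ q ∧ q - x0 < (v :: rest).length ∧
            (v :: rest).getD (q - x0) 0 = 0 :=
          ⟨hc0.1, by omega, by rw [List.length_cons]; omega,
            by rw [show q - x0 = 0 from by omega, List.getD_cons_zero]; exact hc0.2.2⟩
        rw [if_pos hC, hm', if_pos hc0.2.2]
        rw [pv_blk9_get _ _ _ _ (by omega)]
        have hA : ((Y:Int) * 81 + (x0:Int) * 9 ≤ (j:Int) ∧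
            (j:Int) < (Y:Int) * 81 + (x0:Int) * 9 + 9 ∧ j < m.length) := ⟨by omega, by omega, by omega⟩
        rw [if_pos hA]
        congr 1
        simp only [PySem.List.pyGetD_natCast]
        have hSq : (solved.getD Y []).getD q 0 = (solved.getD Y []).getD x0 0 := by
          rw [hc0.2.1]
        rw [hSq]
        by_cases hk : ((j % 9 : Nat) : Int) = (solved.getD Y []).getD x0 0 - 1
        · rw [if_pos hk, if_neg (by
            have h1 := hc0.1
            have h2 := hc0.2.1
            rw [hq] at h2
            omega)]
        · rw [if_neg hk, if_pos (by
            have h1 := hc0.1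
            have h2 := hc0.2.1
            rw [hq] at h2
            omega)]
      · have hnC : ¬(j / 81 = Y ∧ x0 ≤ q ∧ q - x0 < (v :: rest).length ∧
            (v :: rest).getD (q - x0) 0 = 0) := by
          rintro ⟨h1, h2, h3, h4⟩
          by_cases hqx : q = x0
          · exact hc0 ⟨h1, hqx, by
              rwa [show q - x0 = 0 from by omega, List.getD_cons_zero] at h4⟩
          · exact hcond' ⟨h1, by omega, by rw [List.length_cons] at h3; omega, by
              rwa [show q - x0 = (q - (x0 + 1)) + 1 from by omega, List.getD_cons_succ] at h4⟩
        rw [if_neg hnC, hm']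
        by_cases hv : v = 0
        · rw [if_pos hv]
          obtain ⟨hY9, hx9⟩ := hb 0 (by simp) (by simpa using hv)
          rw [pv_blk9_get _ _ _ _ (by omega)]
          rw [if_neg (by
            rintro ⟨h1, h2, h3⟩
            have h2' : q = x0 := by rw [hq]; omega
            have h1' : j / 81 = Y := by omega
            exact hc0 ⟨h1', h2', hv⟩)]
        · rw [if_neg hv]

theorem pv_inner_len (solved : List (List Int)) (Y : Int) (row : List Int) (s : Int)
    (m : List Int) :
    ((PySem.List.enumerate row s).foldl (fun mask xval =>
      if xval.2 = 0 then
        (PySem.List.pyRange (Y * 81 + xval.1 * 9) (Y * 81 + xval.1 * 9 + 9) 1).foldl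
          (fun m i => PySem.List.pySetD m i
            (if i ≠ Y * 81 + xval.1 * 9 + (PySem.List.pyGetD (PySem.List.pyGetD solved Y []) xval.1 0 - 1) then 2 else 1)) mask
      else mask) m).length = m.length := by
  induction row generalizing s m with
  | nil => rw [PySem.List.enumerate_nil, List.foldl_nil]
  | cons v rest ih =>
    rw [PySem.List.enumerate_cons, List.foldl_cons, ih]
    split
    · exact pv_blk9_len ..
    · rfl

theorem pv_outer_len (solved : List (List Int)) (rs : List (List Int)) (s : Int) (m : List Int) :
    ((PySem.List.enumerate rs s).foldl (fun mask yrow =>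
      (PySem.List.enumerate yrow.2 0).foldl (fun mask xval =>
        if xval.2 = 0 then
          (PySem.List.pyRange (yrow.1 * 81 + xval.1 * 9) (yrow.1 * 81 + xval.1 * 9 + 9) 1).foldl
            (fun m i => PySem.List.pySetD m i
              (if i ≠ yrow.1 * 81 + xval.1 * 9 + (PySem.List.pyGetD (PySem.List.pyGetD solved yrow.1 []) xval.1 0 - 1) then 2 else 1)) mask
        else mask) mask) m).length = m.length := by
  induction rs generalizing s m with
  | nil => rw [PySem.List.enumerate_nil, List.foldl_nil]
  | cons r rest ih =>
    rw [PySem.List.enumerate_cons, List.foldl_cons, ih, pv_inner_len]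

theorem pv_outer_char (solved : List (List Int)) (rs : List (List Int)) (y0 : Nat)
    (m : List Int) (hm : m.length = 729) (j : Nat) (hj : j < 729)
    (hb : ∀ y' < rs.length, ∀ x' < (rs.getD y' []).length,
        (rs.getD y' []).getD x' 0 = 0 → y0 + y' < 9 ∧ x' < 9) :
    ((PySem.List.enumerate rs (y0 : Int)).foldl (fun mask yrow =>
      (PySem.List.enumerate yrow.2 0).foldl (fun mask xval =>
        if xval.2 = 0 then
          (PySem.List.pyRange (yrow.1 * 81 + xval.1 * 9) (yrow.1 * 81 + xval.1 * 9 + 9) 1).foldl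
            (fun m i => PySem.List.pySetD m i
              (if i ≠ yrow.1 * 81 + xval.1 * 9 + (PySem.List.pyGetD (PySem.List.pyGetD solved yrow.1 []) xval.1 0 - 1) then 2 else 1)) mask
        else mask) mask) m)[j]? =
    if y0 ≤ j / 81 ∧ j / 81 - y0 < rs.length ∧
        j % 81 / 9 < (rs.getD (j / 81 - y0) []).length ∧
        (rs.getD (j / 81 - y0) []).getD (j % 81 / 9) 0 = 0 then
      some (if ((j % 9 : Nat) : Int) = (solved.getD (j / 81) []).getD (j % 81 / 9) 0 - 1 then 1 else 2)
    else m[j]? := by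
  induction rs generalizing y0 m with
  | nil =>
    rw [PySem.List.enumerate_nil, List.foldl_nil,
      if_neg (by rintro ⟨_, h2, _, _⟩; simp at h2)]
  | cons r rest ih =>
    rw [PySem.List.enumerate_cons, List.foldl_cons]
    have hcast : (y0 : Int) + 1 = ((y0 + 1 : Nat) : Int) := by push_cast; ring
    rw [hcast]
    set q := j % 81 / 9 with hq
    set m' := (PySem.List.enumerate r 0).foldl (fun mask xval =>
        if xval.2 = 0 then
          (PySem.List.pyRange ((y0:Int) * 81 + xval.1 * 9) ((y0:Int) * 81 + xval.1 * 9 + 9) 1).foldl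
            (fun m i => PySem.List.pySetD m i
              (if i ≠ (y0:Int) * 81 + xval.1 * 9 + (PySem.List.pyGetD (PySem.List.pyGetD solved (y0:Int) []) xval.1 0 - 1) then 2 else 1)) mask
        else mask) m with hm'
    have hlen' : m'.length = 729 := by rw [hm', pv_inner_len, hm]
    have hb' : ∀ y' < rest.length, ∀ x' < (rest.getD y' []).length,
        (rest.getD y' []).getD x' 0 = 0 → (y0 + 1) + y' < 9 ∧ x' < 9 := by
      intro y' hy' x' hx' h0
      have := hb (y' + 1) (by simpa using hy') x' (by simpa using hx') (by simpa using h0)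
      omega
    rw [ih (y0 + 1) m' hlen' hb']
    have hbr : ∀ x' < r.length, r.getD x' 0 = 0 → y0 < 9 ∧ 0 + x' < 9 := by
      intro x' hx' h0
      have := hb 0 (by simp) x' (by simpa using hx') (by simpa using h0)
      omega
    have hInner := pv_inner_char solved y0 r 0 m hm j hj hbr
    simp only [Nat.cast_zero, Nat.sub_zero, Nat.zero_le, true_and] at hInner
    rw [hm', hInner]
    by_cases hA : y0 + 1 ≤ j / 81 ∧ j / 81 - (y0 + 1) < rest.length ∧
        q < (rest.getD (j / 81 - (y0 + 1)) []).length ∧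
        (rest.getD (j / 81 - (y0 + 1)) []).getD q 0 = 0
    · rw [if_pos hA]
      have hgd : (r :: rest).getD (j / 81 - y0) [] = rest.getD (j / 81 - (y0 + 1)) [] := by
        rw [show j / 81 - y0 = (j / 81 - (y0 + 1)) + 1 from by omega, List.getD_cons_succ]
      have hC : y0 ≤ j / 81 ∧ j / 81 - y0 < (r :: rest).length ∧
          q < ((r :: rest).getD (j / 81 - y0) []).length ∧
          ((r :: rest).getD (j / 81 - y0) []).getD q 0 = 0 := by
        rw [hgd]
        exact ⟨by omega, by rw [List.length_cons]; omega, hA.2.2.1, hA.2.2.2⟩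
      rw [if_pos hC]
    · rw [if_neg hA]
      by_cases hB : j / 81 = y0 ∧ q < r.length ∧ r.getD q 0 = 0
      · rw [if_pos hB]
        have hgd : (r :: rest).getD (j / 81 - y0) [] = r := by
          rw [show j / 81 - y0 = 0 from by omega, List.getD_cons_zero]
        have hC : y0 ≤ j / 81 ∧ j / 81 - y0 < (r :: rest).length ∧
            q < ((r :: rest).getD (j / 81 - y0) []).length ∧
            ((r :: rest).getD (j / 81 - y0) []).getD q 0 = 0 := by
          rw [hgd]
          exact ⟨by omega, by rw [List.length_cons]; omega, hB.2.1, hB.2.2⟩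
        rw [if_pos hC, hB.1]
      · rw [if_neg hB]
        have hnC : ¬(y0 ≤ j / 81 ∧ j / 81 - y0 < (r :: rest).length ∧
            q < ((r :: rest).getD (j / 81 - y0) []).length ∧
            ((r :: rest).getD (j / 81 - y0) []).getD (q) 0 = 0) := by
          rintro ⟨h1, h2, h3, h4⟩
          by_cases hy : j / 81 = y0
          · rw [show j / 81 - y0 = 0 from by omega, List.getD_cons_zero] at h3 h4
            exact hB ⟨hy, h3, h4⟩
          · rw [show j / 81 - y0 = (j / 81 - (y0 + 1)) + 1 from by omega,
              List.getD_cons_succ] at h3 h4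
            exact hA ⟨by omega, by rw [List.length_cons] at h2; omega, h3, h4⟩
        rw [if_neg hnC]

theorem pv_A_len (board solved : List (List Int)) :
    (get_actual_rewards_mask board solved).length = 729 := by
  unfold get_actual_rewards_mask
  exact (pv_outer_len solved board 0 (List.replicate (81*9) 0)).trans (by rw [List.length_replicate])

theorem pv_A_get (board solved : List (List Int))
    (hpre : Pre_get_actual_rewards_mask board solved) (j : Nat) (hj : j < 729) :
    (get_actual_rewards_mask board solved)[j]? = some (pvSv board solved j) := by
  have hb : ∀ y' < board.length, ∀ x' < (board.getD y' []).length,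
      (board.getD y' []).getD x' 0 = 0 → 0 + y' < 9 ∧ x' < 9 := by
    intro y' hy' x' hx' h0
    have := hpre y' hy' x' hx' h0
    omega
  have h := pv_outer_char solved board 0 (List.replicate (81*9) 0) (by rw [List.length_replicate]) j hj hb
  simp only [Nat.cast_zero, Nat.sub_zero, Nat.zero_le, true_and] at h
  unfold get_actual_rewards_mask
  refine h.trans ?_
  unfold pvSv
  by_cases hc : j / 81 < board.length ∧ j % 81 / 9 < (board.getD (j / 81) []).length ∧
      (board.getD (j / 81) []).getD (j % 81 / 9) 0 = 0
  · rw [if_pos hc, if_pos hc]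
  · rw [if_neg hc, if_neg hc, List.getElem?_replicate, if_pos (by omega)]

theorem pv_B_len (board solved : List (List Int)) :
    (get_actual_rewards_mask_alt board solved).length = 729 := by
  unfold get_actual_rewards_mask_alt
  rw [List.length_map, PySem.List.length_pyRange_one]
  rfl

theorem pv_B_get (board solved : List (List Int)) (j : Nat) (hj : j < 729) :
    (get_actual_rewards_mask_alt board solved)[j]? = some (pvSv board solved j) := by
  unfold get_actual_rewards_mask_alt
  rw [show (729:Int) = ((729:Nat):Int) from by norm_num]
  rw [PySem.List.getElem?_map_pyRange_zero _ _ _ hj]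
  congr 1
  have h81 : PySem.Int.floordiv (j:Int) 81 = ((j/81 : Nat) : Int) := by
    exact_mod_cast PySem.Int.floordiv_natCast j 81
  have hm81 : PySem.Int.mod (j:Int) 81 = ((j%81 : Nat) : Int) := by
    exact_mod_cast PySem.Int.mod_natCast j 81
  have h9 : PySem.Int.floordiv ((j % 81 : Nat) : Int) 9 = ((j % 81 / 9 : Nat) : Int) := by
    exact_mod_cast PySem.Int.floordiv_natCast (j % 81) 9
  have hm9 : PySem.Int.mod (j:Int) 9 = ((j%9 : Nat) : Int) := by
    exact_mod_cast PySem.Int.mod_natCast j 9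
  rw [h81, hm81, h9, hm9]
  unfold pvCellAlt pvSv
  simp only [PySem.List.pyGetD_natCast, Nat.cast_lt]
  by_cases c1 : j / 81 < board.length
  · rw [if_pos c1]
    by_cases c2 : j % 81 / 9 < (board.getD (j/81) []).length
    · rw [if_pos c2]
      by_cases c3 : (board.getD (j/81) []).getD (j % 81 / 9) 0 = 0
      · have hC : j / 81 < board.length ∧ j % 81 / 9 < (board.getD (j / 81) []).length ∧
            (board.getD (j / 81) []).getD (j % 81 / 9) 0 = 0 := ⟨c1, c2, c3⟩
        rw [if_pos c3, if_pos hC]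
      · rw [if_neg c3, if_neg (by tauto)]
    · rw [if_neg c2, if_neg (by tauto)]
  · rw [if_neg c1, if_neg (by tauto)]

-- ===== VERDICT (by name: the statement is the Claim_ definition above) =====
theorem get_actual_rewards_mask_spec : Claim_equal_get_actual_rewards_mask := by
  intro board solved _ hpre
  unfold Spec_get_actual_rewards_mask
  apply List.ext_getElem?
  intro j
  by_cases hj : j < 729
  · rw [pv_A_get board solved hpre j hj, pv_B_get board solved j hj]
  · rw [List.getElem?_eq_none, List.getElem?_eq_none]
    · rw [pv_B_len]; omega
    · rw [pv_A_len]; omega
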